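-- pv_equiv track=rewrite | github.com/MercnikL/Palfinger_DATA | DATA/02_ZPRLAW/TransformZPRLAW.py | fSetCC
-- ===== SOURCE A (Python) =====
-- def fSetCC(Tim):
--     "Return CC according to TeamNm"
--     CC = [["BF", 40, 41, 42, 43, 44],
--           ["KS", 60, 62, 63, 64, 65, 66, 68],
--           ["GG", 50, 51, 52, 53, 54, 55, 56],
--           ["EPS", 30, 57, 58, 59, 67],
--           ["GTC", 80, 76, 81, 82, 83, 84, 85],
--           ["GKC", 70, 71, 72, 77, 78, 79, 61],
--           ["KSR", 61],
--           ["LAK", 91],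
--           ["MGK", 90, 92, 93, 94, 95, 96, 97, 98],
--           ["WERK", 11],
--           ["LOG", 12],
--           ["EK", 13],
--           ["CONTR", 14],
--           ["PPS", 15],
--           ["AT", 16],
--           ["ST", 17],
--           ["HR", 18],
--           ["WZA", 19],
--           ["INST", 20],
--           ["QM", 21],
--           ["IT", 22]]
--     try:
--         search = int(Tim[-2:]) #z desne dva znaka
--     except:
--         return('TeamNm Error')
--
--     for sublist in CC:
--         if search in sublist:
--             return(sublist[0])
--             break
-- ===== SOURCE B (Python) =====
-- def fSetCC(Tim):
--     "Return CC according to TeamNm"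
--     try:
--         search = int(Tim[-2:])  # last two characters
--     except:
--         return('TeamNm Error')
--     # arithmetic interval dispatch instead of a table scan
--     if 11 <= search <= 22:
--         return ["WERK", "LOG", "EK", "CONTR", "PPS", "AT", "ST",
--                 "HR", "WZA", "INST", "QM", "IT"][search - 11]
--     if search == 30:
--         return "EPS"
--     if 40 <= search <= 44:
--         return "BF"
--     if 50 <= search <= 56:
--         return "GG"
--     if 57 <= search <= 59:
--         return "EPS"
--     if search == 61:
--         return "GKC"
--     if search == 67:
--         return "EPS"
--     if 60 <= search <= 68:
--         return "KS"
--     if 70 <= search <= 72 or 77 <= search <= 79: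
--         return "GKC"
--     if search == 76 or 80 <= search <= 85:
--         return "GTC"
--     if search == 91:
--         return "LAK"
--     if search == 90 or 92 <= search <= 98:
--         return "MGK"
--     return None
-- ===== Notes on version B (the rewrite author's own statement) =====
-- stated objective: alternative
-- what changed: Replaces the per-call scan over the nested team-code table with an arithmetic interval-dispatch chain (range comparisons plus one indexed name list for 11-22); no code table is scanned or searched at all, and the duplicate code 61 is resolved by an explicit early equality test (GKC).
import Mathlib
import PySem

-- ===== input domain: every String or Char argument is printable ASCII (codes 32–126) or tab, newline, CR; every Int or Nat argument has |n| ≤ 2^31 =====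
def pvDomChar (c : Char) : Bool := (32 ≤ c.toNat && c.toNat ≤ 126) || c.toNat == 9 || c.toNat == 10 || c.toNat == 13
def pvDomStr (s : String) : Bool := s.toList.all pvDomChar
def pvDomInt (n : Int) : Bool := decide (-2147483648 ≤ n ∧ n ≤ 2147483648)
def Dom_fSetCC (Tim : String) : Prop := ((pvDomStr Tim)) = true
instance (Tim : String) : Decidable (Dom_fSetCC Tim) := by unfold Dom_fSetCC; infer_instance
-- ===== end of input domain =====

-- B replaces A's per-call scan over the nested team-code table by an arithmetic
-- interval-dispatch chain (objective: alternative, same cost class on these sizes).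

-- ===== PORT A =====
-- A's rows mix a string head with int codes; modelled as (name, codes) — Python's
-- 'search in sublist' can only ever match the int members, never the string head.
def fSetCC_CC : List (String × List Int) :=
  [("BF", [40, 41, 42, 43, 44]),
   ("KS", [60, 62, 63, 64, 65, 66, 68]),
   ("GG", [50, 51, 52, 53, 54, 55, 56]),
   ("EPS", [30, 57, 58, 59, 67]),
   ("GTC", [80, 76, 81, 82, 83, 84, 85]),
   ("GKC", [70, 71, 72, 77, 78, 79, 61]),
   ("KSR", [61]),
   ("LAK", [91]),
   ("MGK", [90, 92, 93, 94, 95, 96, 97, 98]),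
   ("WERK", [11]),
   ("LOG", [12]),
   ("EK", [13]),
   ("CONTR", [14]),
   ("PPS", [15]),
   ("AT", [16]),
   ("ST", [17]),
   ("HR", [18]),
   ("WZA", [19]),
   ("INST", [20]),
   ("QM", [21]),
   ("IT", [22])]

def fSetCC_scan (s : Int) : List (String × List Int) → Option String
  | [] => none
  | (nm, codes) :: rest => if s ∈ codes then some nm else fSetCC_scan s rest

def fSetCC (Tim : String) : Option String :=
  match PySem.Int.ofStr? (PySem.Str.slice Tim (some (-2)) none) with
  | none => some "TeamNm Error"
  | some search => fSetCC_scan search fSetCC_CC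

-- ===== PORT B =====
-- Source B's if-chain of range tests; the 11–22 block indexes a literal name list.
def fSetCC_alt_dispatch (s : Int) : Option String :=
  if 11 ≤ s ∧ s ≤ 22 then
    PySem.List.pyGet? ["WERK", "LOG", "EK", "CONTR", "PPS", "AT", "ST",
                       "HR", "WZA", "INST", "QM", "IT"] (s - 11)
  else if s = 30 then some "EPS"
  else if 40 ≤ s ∧ s ≤ 44 then some "BF"
  else if 50 ≤ s ∧ s ≤ 56 then some "GG"
  else if 57 ≤ s ∧ s ≤ 59 then some "EPS"
  else if s = 61 then some "GKC"
  else if s = 67 then some "EPS"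
  else if 60 ≤ s ∧ s ≤ 68 then some "KS"
  else if (70 ≤ s ∧ s ≤ 72) ∨ (77 ≤ s ∧ s ≤ 79) then some "GKC"
  else if s = 76 ∨ (80 ≤ s ∧ s ≤ 85) then some "GTC"
  else if s = 91 then some "LAK"
  else if s = 90 ∨ (92 ≤ s ∧ s ≤ 98) then some "MGK"
  else none

def fSetCC_alt (Tim : String) : Option String :=
  match PySem.Int.ofStr? (PySem.Str.slice Tim (some (-2)) none) with
  | none => some "TeamNm Error"
  | some search => fSetCC_alt_dispatch search

-- ===== PRECONDITION & SPEC =====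
def Spec_fSetCC (Tim : String) (out : Option String) : Prop := out = fSetCC_alt Tim
instance (Tim : String) (out : Option String) : Decidable (Spec_fSetCC Tim out) := by unfold Spec_fSetCC; infer_instance

-- ===== CLAIM (what is proved, stated in full; the proofs are below) =====
def Claim_equal_fSetCC : Prop := ∀ (Tim : String), Dom_fSetCC Tim → Spec_fSetCC Tim (fSetCC Tim)

-- ===== LEMMAS AND PROOFS =====

lemma fSetCC_scan_none_aux (s : Int) (rows : List (String × List Int))
    (h : ∀ p ∈ rows, s ∉ p.2) : fSetCC_scan s rows = none := by
  induction rows with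
  | nil => rfl
  | cons p rest ih =>
      obtain ⟨nm, codes⟩ := p
      rw [fSetCC_scan, if_neg (h (nm, codes) (List.mem_cons_self))]
      exact ih fun q hq => h q (List.mem_cons_of_mem _ hq)

lemma fSetCC_scan_none (s : Int) (h : ¬ (11 ≤ s ∧ s ≤ 98)) :
    fSetCC_scan s fSetCC_CC = none := by
  apply fSetCC_scan_none_aux
  intro p hp
  simp only [fSetCC_CC, List.mem_cons, List.not_mem_nil, or_false] at hp
  rcases hp with rfl|rfl|rfl|rfl|rfl|rfl|rfl|rfl|rfl|rfl|rfl|rfl|rfl|rfl|rfl|rfl|rfl|rfl|rfl|rfl|rfl <;>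
    · simp only [List.mem_cons, List.not_mem_nil, or_false]
      omega

lemma fSetCC_dispatch_none (s : Int) (h : ¬ (11 ≤ s ∧ s ≤ 98)) :
    fSetCC_alt_dispatch s = none := by
  rw [fSetCC_alt_dispatch,
    if_neg (by omega : ¬ (11 ≤ s ∧ s ≤ 22)),
    if_neg (by omega : ¬ s = 30),
    if_neg (by omega : ¬ (40 ≤ s ∧ s ≤ 44)),
    if_neg (by omega : ¬ (50 ≤ s ∧ s ≤ 56)),
    if_neg (by omega : ¬ (57 ≤ s ∧ s ≤ 59)),
    if_neg (by omega : ¬ s = 61),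
    if_neg (by omega : ¬ s = 67),
    if_neg (by omega : ¬ (60 ≤ s ∧ s ≤ 68)),
    if_neg (by omega : ¬ ((70 ≤ s ∧ s ≤ 72) ∨ (77 ≤ s ∧ s ≤ 79))),
    if_neg (by omega : ¬ (s = 76 ∨ (80 ≤ s ∧ s ≤ 85))),
    if_neg (by omega : ¬ s = 91),
    if_neg (by omega : ¬ (s = 90 ∨ (92 ≤ s ∧ s ≤ 98)))]

set_option maxRecDepth 8000 in
lemma fSetCC_dispatch_eq (s : Int) :
    fSetCC_scan s fSetCC_CC = fSetCC_alt_dispatch s := by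
  by_cases h : 11 ≤ s ∧ s ≤ 98
  · obtain ⟨h1, h2⟩ := h
    interval_cases s <;> decide
  · rw [fSetCC_scan_none s h, fSetCC_dispatch_none s h]

-- ===== VERDICT (by name: the statement is the Claim_ definition above) =====
theorem fSetCC_spec : Claim_equal_fSetCC := by
  intro Tim _
  unfold Spec_fSetCC fSetCC fSetCC_alt
  cases PySem.Int.ofStr? (PySem.Str.slice Tim (some (-2)) none) with
  | none => rfl
  | some s => exact fSetCC_dispatch_eq s
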